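-- pv_equiv track=rewrite | github.com/ikashilov/INF-3200 | final/main_runner.py | create_alloc_table
-- ===== SOURCE A (Python) =====
-- keys = ['0','1','2','3','4','5','6','7','8','9','a','b','c','d','e','f']
--
-- def create_alloc_table(nodes_ids):
-- 	table = {}
-- 	step = len(keys) // len(nodes_ids)
--
-- 	j = 0 # C-style programming ;)
--
-- 	if (len(keys) % len(nodes_ids)) == 0:
-- 	# case 2,4,8,16
-- 		for i in range(0, len(keys)-step+1, step):
-- 			table[nodes_ids[j]] = keys[i:i+step]
-- 			j+=1
-- 	else:
-- 		bound = len(keys) - len(nodes_ids) * step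
-- 		step1 = step + 1
-- 		for i in range(0, bound):
-- 			table[nodes_ids[i]] = keys[j:j+step1]
-- 			j+=step1
-- 		for i in range(bound, len(nodes_ids)):
-- 			table[nodes_ids[i]] = keys[j:j+step]
-- 			j+=step
--
-- 	return table
-- ===== SOURCE B (Python) =====
-- keys = ['0','1','2','3','4','5','6','7','8','9','a','b','c','d','e','f']
--
-- def create_alloc_table(nodes_ids):
--     n = len(nodes_ids)
--     step, bound = divmod(len(keys), n)
--     cut = bound * (step + 1)
--     buckets = [[] for _ in range(n)]
--     for i, k in enumerate(keys):
--         p = i // (step + 1) if i < cut else bound + (i - cut) // step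
--         buckets[p].append(k)
--     return dict(zip(nodes_ids, buckets))
-- ===== Notes on version B (the rewrite author's own statement) =====
-- stated objective: alternative
-- what changed: A slices the keys list node by node in two separate branches (evenly divisible vs remainder); B inverts the traversal: one pass over the 16 keys computes each key's node position arithmetically (i // (step+1) in the fat region, bound + (i - cut) // step after it) and appends the key to that node's bucket, then builds the dict with dict(zip(nodes_ids, buckets)).
import Mathlib
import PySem

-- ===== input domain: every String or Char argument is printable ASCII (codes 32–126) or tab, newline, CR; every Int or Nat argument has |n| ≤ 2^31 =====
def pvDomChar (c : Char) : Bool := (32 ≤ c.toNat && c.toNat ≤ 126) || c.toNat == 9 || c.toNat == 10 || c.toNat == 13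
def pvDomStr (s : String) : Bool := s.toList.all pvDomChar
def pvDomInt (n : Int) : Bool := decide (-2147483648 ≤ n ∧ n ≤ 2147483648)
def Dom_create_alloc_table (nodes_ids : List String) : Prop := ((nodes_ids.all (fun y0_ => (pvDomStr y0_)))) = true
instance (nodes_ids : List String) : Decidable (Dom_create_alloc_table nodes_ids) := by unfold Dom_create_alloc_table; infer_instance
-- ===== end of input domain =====

-- B replaces A's node-driven slicing (two branches cutting `keys` into per-node slices) by a
-- key-driven classification: one pass over the 16 keys computes each key's node position by
-- integer arithmetic and appends it to that node's bucket, then dict(zip(...)).  Objective: alternative.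

-- the module constant `keys`
def pvKeys : List String :=
  ["0","1","2","3","4","5","6","7","8","9","a","b","c","d","e","f"]

-- ===== PORT A =====
def create_alloc_table (nodes_ids : List String) : List (String × List String) :=
  let table : PySem.Dict String (List String) := PySem.Dict.empty
  let step : Int := PySem.Int.floordiv (pvKeys.length : Int) (nodes_ids.length : Int)
  if PySem.Int.mod (pvKeys.length : Int) (nodes_ids.length : Int) = 0 then
    -- case 2,4,8,16
    ((PySem.List.pyRange 0 ((pvKeys.length : Int) - step + 1) step).foldl
      (fun (st : PySem.Dict String (List String) × Int) i =>
        (st.1.insert ((PySem.List.pyGet? nodes_ids st.2).getD "")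
          (PySem.List.slice pvKeys (some i) (some (i + step))), st.2 + 1))
      (table, 0)).1.items
  else
    let bound : Int := (pvKeys.length : Int) - (nodes_ids.length : Int) * step
    let step1 : Int := step + 1
    let st1 := (PySem.List.pyRange 0 bound 1).foldl
      (fun (st : PySem.Dict String (List String) × Int) i =>
        (st.1.insert ((PySem.List.pyGet? nodes_ids i).getD "")
          (PySem.List.slice pvKeys (some st.2) (some (st.2 + step1))), st.2 + step1))
      (table, 0)
    let st2 := (PySem.List.pyRange bound (nodes_ids.length : Int) 1).foldl
      (fun (st : PySem.Dict String (List String) × Int) i =>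
        (st.1.insert ((PySem.List.pyGet? nodes_ids i).getD "")
          (PySem.List.slice pvKeys (some st.2) (some (st.2 + step))), st.2 + step))
      st1
    st2.1.items

-- ===== PORT B =====
-- buckets[p].append(k): exact for 0 ≤ p < len(buckets), which B's arithmetic guarantees
-- (Python would raise IndexError otherwise; that is never reached).
def pvAppendAt : List (List String) → Int → String → List (List String)
  | [], _, _ => []
  | b :: bs, p, x => if p = 0 then (b ++ [x]) :: bs else b :: pvAppendAt bs (p - 1) x

def create_alloc_table_alt (nodes_ids : List String) : List (String × List String) :=
  let sb := (PySem.Int.divmod? (pvKeys.length : Int) (nodes_ids.length : Int)).getD (0, 0)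
  let step := sb.1
  let bound := sb.2
  let cut := bound * (step + 1)
  let buckets := (PySem.List.enumerate pvKeys).foldl
    (fun (bks : List (List String)) p =>
      pvAppendAt bks
        (if p.1 < cut then PySem.Int.floordiv p.1 (step + 1)
         else bound + PySem.Int.floordiv (p.1 - cut) step) p.2)
    (List.replicate nodes_ids.length [])
  ((nodes_ids.zip buckets).foldl
    (fun (d : PySem.Dict String (List String)) p => d.insert p.1 p.2) PySem.Dict.empty).items

-- ===== PRECONDITION & SPEC =====
-- Pre_ excludes only the empty list, on which Python A (and B) raises ZeroDivisionError.
def Pre_create_alloc_table (nodes_ids : List String) : Prop := nodes_ids ≠ []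
instance (nodes_ids : List String) : Decidable (Pre_create_alloc_table nodes_ids) := by unfold Pre_create_alloc_table; infer_instance
def pvWitness_create_alloc_table : List String := ["n0"]

def Spec_create_alloc_table (nodes_ids : List String) (out : List (String × List String)) : Prop := out = create_alloc_table_alt nodes_ids
instance (nodes_ids : List String) (out : List (String × List String)) : Decidable (Spec_create_alloc_table nodes_ids out) := by unfold Spec_create_alloc_table; infer_instance

-- ===== CLAIM (what is proved, stated in full; the proofs are below) =====
def Claim_equal_create_alloc_table : Prop := ∀ (nodes_ids : List String), Dom_create_alloc_table nodes_ids → Pre_create_alloc_table nodes_ids → Spec_create_alloc_table nodes_ids (create_alloc_table nodes_ids)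

-- ===== LEMMAS AND PROOFS =====

-- a chain of dict assignments: for each (node, start, size) do table[node] = keys[start:start+size]
def pvChain : List (String × Int × Int) → PySem.Dict String (List String) → PySem.Dict String (List String)
  | [], t => t
  | (x, s, z) :: r, t => pvChain r (t.insert x (PySem.List.slice pvKeys (some s) (some (s + z))))

-- the (node, start, size) triples of a constant-size run
def pvCzs (c : Int) : List String → Int → List (String × Int × Int)
  | [], _ => []
  | x :: xs, s => (x, s, c) :: pvCzs c xs (s + c)

-- the (node, start, size) triples of the allocation, with node counter i
def pvPlan (step bnd : Int) : List String → Int → Int → List (String × Int × Int)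
  | [], _, _ => []
  | x :: xs, i, s =>
    (x, s, if i < bnd then step + 1 else step) ::
      pvPlan step bnd xs (i + 1) (s + if i < bnd then step + 1 else step)

-- the slice a plan entry stands for
def pvF (t : String × Int × Int) : List String :=
  PySem.List.slice pvKeys (some t.2.1) (some (t.2.1 + t.2.2))

-- the value lists of the plan; depends only on the node COUNT
def pvPlanVals (step bnd : Int) : Nat → Int → Int → List (List String)
  | 0, _, _ => []
  | m + 1, i, s =>
    PySem.List.slice pvKeys (some s) (some (s + if i < bnd then step + 1 else step)) ::
      pvPlanVals step bnd m (i + 1) (s + if i < bnd then step + 1 else step)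

-- a constant-size run of slices
def pvRun (c : Int) : Nat → Int → List (List String)
  | 0, _ => []
  | m + 1, s => PySem.List.slice pvKeys (some s) (some (s + c)) :: pvRun c m (s + c)

theorem pvChain_append (p q : List (String × Int × Int)) (t : PySem.Dict String (List String)) :
    pvChain (p ++ q) t = pvChain q (pvChain p t) := by
  induction p generalizing t with
  | nil => rfl
  | cons h r ih => obtain ⟨x, s, z⟩ := h; simp [pvChain, ih]

theorem pvPlan_ge (step bnd : Int) (xs : List String) (i s : Int) (h : bnd ≤ i) :
    pvPlan step bnd xs i s = pvCzs step xs s := by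
  induction xs generalizing i s with
  | nil => rfl
  | cons x xs ih => simp only [pvPlan, pvCzs, if_neg (by omega : ¬ i < bnd)]; rw [ih _ _ (by omega)]

theorem pvPlan_split (step bnd : Int) (u v : List String) (i s : Int)
    (hi : 0 ≤ i) (hlen : i + u.length = bnd) :
    pvPlan step bnd (u ++ v) i s =
      pvCzs (step + 1) u s ++ pvCzs step v (s + (step + 1) * u.length) := by
  induction u generalizing i s with
  | nil =>
    simp only [List.nil_append, pvCzs, List.length_nil] at *
    rw [pvPlan_ge step bnd v i s (by omega)]; norm_num
  | cons x u ih =>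
    have hx : i < bnd := by simp at hlen; omega
    simp only [List.cons_append, pvPlan, pvCzs, if_pos hx]
    rw [ih (i + 1) (s + (step + 1)) (by omega) (by simp at hlen ⊢; omega)]
    congr 2
    congr 1
    simp only [List.length_cons]
    push_cast
    ring

-- the value lists of a plan depend only on the number of nodes
theorem pvPlan_map_vals (step bnd : Int) (xs : List String) (i s : Int) :
    (pvPlan step bnd xs i s).map pvF = pvPlanVals step bnd xs.length i s := by
  induction xs generalizing i s with
  | nil => rfl
  | cons x xs ih => simp only [pvPlan, List.map_cons, List.length_cons, pvPlanVals, pvF, ih]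

-- dict(zip(nodes, values of the plan)) is the chain of the plan's assignments
theorem pvZip_chain (step bnd : Int) (xs : List String) (i s : Int)
    (t : PySem.Dict String (List String)) :
    (xs.zip ((pvPlan step bnd xs i s).map pvF)).foldl
      (fun (d : PySem.Dict String (List String)) p => d.insert p.1 p.2) t
    = pvChain (pvPlan step bnd xs i s) t := by
  induction xs generalizing i s t with
  | nil => rfl
  | cons x xs ih =>
    simp only [pvPlan, List.map_cons, List.zip_cons_cons, List.foldl_cons, pvF, pvChain]
    exact ih _ _ _

theorem pvPlanVals_ge (step bnd : Int) (m : Nat) (i s : Int) (h : bnd ≤ i) :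
    pvPlanVals step bnd m i s = pvRun step m s := by
  induction m generalizing i s with
  | zero => rfl
  | succ m ih =>
    simp only [pvPlanVals, pvRun, if_neg (by omega : ¬ i < bnd)]
    rw [ih _ _ (by omega)]

theorem pvPlanVals_split (step bnd : Int) (a m : Nat) (i s : Int)
    (hi : 0 ≤ i) (hlen : i + a = bnd) :
    pvPlanVals step bnd (a + m) i s =
      pvRun (step + 1) a s ++ pvPlanVals step bnd m (i + a) (s + (step + 1) * a) := by
  induction a generalizing i s with
  | zero =>
    simp only [Nat.cast_zero, add_zero, mul_zero, Nat.zero_add, pvRun, List.nil_append]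
  | succ a ih =>
    have hx : i < bnd := by push_cast at hlen; omega
    rw [show a + 1 + m = (a + m) + 1 from by omega]
    simp only [pvPlanVals, pvRun, if_pos hx]
    rw [ih (i + 1) (s + (step + 1)) (by omega) (by push_cast at hlen ⊢; omega)]
    simp only [List.cons_append]
    congr 3 <;> push_cast <;> ring

theorem pvRun_zero (m : Nat) (s : Int) : pvRun 0 m s = List.replicate m [] := by
  induction m generalizing s with
  | zero => rfl
  | succ m ih =>
    have hlen : (PySem.List.slice pvKeys (some s) (some (s + 0))).length = 0 := by
      simp [PySem.List.length_slice]
    simp only [pvRun, List.replicate_succ, ih, List.length_eq_zero_iff.mp hlen]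

theorem pvAppendAt_length (l : List (List String)) (p : Int) (x : String) :
    (pvAppendAt l p x).length = l.length := by
  induction l generalizing p with
  | nil => rfl
  | cons b bs ih => simp only [pvAppendAt]; split_ifs <;> simp [ih]

theorem pvAppendAt_append (l r : List (List String)) (p : Int) (x : String)
    (h0 : 0 ≤ p) (h1 : p < (l.length : Int)) :
    pvAppendAt (l ++ r) p x = pvAppendAt l p x ++ r := by
  induction l generalizing p with
  | nil => simp at h1; omega
  | cons b bs ih =>
    simp only [List.cons_append, pvAppendAt]
    split_ifs with hp
    · rfl
    · rw [ih (p - 1) (by omega) (by simp at h1 ⊢; omega)]; rfl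

-- a fold of in-prefix appends leaves the suffix untouched
theorem pvFoldPref (ks : List String) (i0 : Int) (l r : List (List String))
    (h0 : 0 ≤ i0) (h1 : i0 + ks.length ≤ (l.length : Int)) :
    (PySem.List.enumerate ks i0).foldl (fun bks p => pvAppendAt bks p.1 p.2) (l ++ r)
    = (PySem.List.enumerate ks i0).foldl (fun bks p => pvAppendAt bks p.1 p.2) l ++ r := by
  induction ks generalizing i0 l with
  | nil => rfl
  | cons k ks ih =>
    rw [PySem.List.enumerate_cons]
    simp only [List.foldl_cons]
    rw [pvAppendAt_append l r i0 k h0 (by simp at h1; omega)]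
    exact ih (i0 + 1) _ (by omega) (by rw [pvAppendAt_length]; simp at h1 ⊢; omega)

-- THE CRUX: B's key-driven bucket fill produces exactly the plan's value lists
theorem pvBucketsVals (n : Nat) (hn : 1 ≤ n) :
    (PySem.List.enumerate pvKeys).foldl
      (fun (bks : List (List String)) p =>
        pvAppendAt bks
          (if p.1 < PySem.Int.mod 16 (n : Int) * (PySem.Int.floordiv 16 (n : Int) + 1)
           then PySem.Int.floordiv p.1 (PySem.Int.floordiv 16 (n : Int) + 1)
           else PySem.Int.mod 16 (n : Int) +
             PySem.Int.floordiv (p.1 - PySem.Int.mod 16 (n : Int) * (PySem.Int.floordiv 16 (n : Int) + 1))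
               (PySem.Int.floordiv 16 (n : Int))) p.2)
      (List.replicate n [])
    = pvPlanVals (PySem.Int.floordiv 16 (n : Int)) (PySem.Int.mod 16 (n : Int)) n 0 0 := by
  by_cases hle : n ≤ 16
  · interval_cases n <;> decide
  · obtain ⟨m, rfl⟩ : ∃ m, n = m + 17 := ⟨n - 17, by omega⟩
    have hnpos : (0 : Int) < ((m + 17 : Nat) : Int) := by push_cast; omega
    have hstep : PySem.Int.floordiv 16 ((m + 17 : Nat) : Int) = 0 := by
      rw [PySem.Int.floordiv_eq_ediv_of_pos hnpos]
      exact Int.ediv_eq_zero_of_lt (by norm_num) (by push_cast; omega)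
    have hbnd : PySem.Int.mod 16 ((m + 17 : Nat) : Int) = 16 := by
      have h := PySem.Int.floordiv_mul_add_mod 16 ((m + 17 : Nat) : Int)
      rw [hstep] at h
      omega
    rw [hstep, hbnd]
    norm_num
    have hcongr := PySem.List.foldl_congr_mem
      (l := PySem.List.enumerate pvKeys)
      (init := List.replicate (m + 17) ([] : List String))
      (f := fun (bks : List (List String)) (p : Int × String) =>
        pvAppendAt bks (if p.1 < 16 then p.1 else 16 + PySem.Int.floordiv (p.1 - 16) 0) p.2)
      (g := fun bks p => pvAppendAt bks p.1 p.2)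
      (by
        intro acc x hx
        rw [PySem.List.mem_enumerate_iff] at hx
        obtain ⟨k, hk, rfl⟩ := hx
        have hk16 : (k : Int) < 16 := by
          have : pvKeys.length = 16 := by decide
          omega
        simp only [zero_add]
        rw [if_pos hk16])
    rw [hcongr]
    rw [show m + 17 = 16 + (m + 1) from by omega, List.replicate_add]
    rw [pvFoldPref pvKeys 0 (List.replicate 16 []) (List.replicate (m + 1) []) le_rfl (by decide)]
    rw [show 16 + (m + 1) = (16 : Nat) + (m + 1) from rfl,
        pvPlanVals_split 0 16 16 (m + 1) 0 0 le_rfl (by norm_num)]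
    push_cast
    rw [pvPlanVals_ge 0 16 (m + 1) 16 16 (by norm_num), pvRun_zero]
    congr 1

-- cons form of pyRange for a positive step
theorem pvRange_pos_cons (a b c : Int) (hc : 0 < c) (hab : a < b) :
    PySem.List.pyRange a b c = a :: PySem.List.pyRange (a + c) b c := by
  rw [PySem.List.pyRange_of_pos _ _ hc, PySem.List.pyRange_of_pos _ _ hc]
  have hx : 0 ≤ (b - (a + c) + c - 1) / c := Int.ediv_nonneg (by omega) (by omega)
  have h1 : (b - a + c - 1) / c = (b - (a + c) + c - 1) / c + 1 := by
    have h2 := Int.add_mul_ediv_right (b - (a + c) + c - 1) 1 (by omega : c ≠ 0)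
    have h3 : b - (a + c) + c - 1 + 1 * c = b - a + c - 1 := by ring
    rw [h3] at h2
    omega
  by_cases hacb : a + c < b
  · rw [if_pos hab, if_pos hacb, h1]
    rw [show ((b - (a + c) + c - 1) / c + 1).toNat = ((b - (a + c) + c - 1) / c).toNat + 1 by omega]
    rw [List.range_succ_eq_map]
    simp only [List.map_cons, List.map_map]
    refine congrArg₂ _ (by ring) ?_
    apply List.map_congr_left
    intro k _
    simp only [Function.comp_apply]
    push_cast
    ring
  · rw [if_pos hab, if_neg hacb]
    have h0 : (b - (a + c) + c - 1) / c = 0 := Int.ediv_eq_zero_of_lt (by omega) (by omega)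
    rw [h1, h0]
    simp

-- an index loop of A with a constant slice size c, running over the segment v of nodes
theorem pvA_loop (c : Int) (nodes : List String) (v pre rest : List String) (a b : Int)
    (hsplit : pre ++ v ++ rest = nodes) (ha : a = pre.length) (hb : b = a + v.length)
    (t : PySem.Dict String (List String)) (s : Int) :
    ((PySem.List.pyRange a b 1).foldl
      (fun (st : PySem.Dict String (List String) × Int) i =>
        (st.1.insert ((PySem.List.pyGet? nodes i).getD "")
          (PySem.List.slice pvKeys (some st.2) (some (st.2 + c))), st.2 + c))
      (t, s)) = (pvChain (pvCzs c v s) t, s + c * v.length) := by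
  induction v generalizing pre a b t s with
  | nil =>
    subst hsplit ha hb
    simp [PySem.List.pyRange_one_eq_nil, pvChain, pvCzs]
  | cons x v ih =>
    subst ha hb hsplit
    have hcons : PySem.List.pyRange (pre.length : Int) ((pre.length : Int) + ((x :: v).length : Int)) 1
        = (pre.length : Int) :: PySem.List.pyRange ((pre.length : Int) + 1)
            ((pre.length : Int) + ((x :: v).length : Int)) 1 := by
      apply PySem.List.pyRange_one_cons
      simp only [List.length_cons]
      push_cast
      omega
    have hget : PySem.List.pyGet? (pre ++ (x :: v) ++ rest) ((pre.length : Int)) = some x := by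
      rw [List.append_assoc, List.cons_append]
      exact PySem.List.pyGet?_append_length pre (v ++ rest) x
    rw [hcons]
    simp only [List.foldl_cons]
    rw [hget]
    simp only [Option.getD_some]
    have := ih (pre ++ [x]) ((pre.length : Int) + 1) ((pre.length : Int) + ((x :: v).length : Int))
      (by simp) (by simp) (by simp only [List.length_cons]; push_cast; ring)
      (t.insert x (PySem.List.slice pvKeys (some s) (some (s + c)))) (s + c)
    rw [this]
    simp only [pvChain, pvCzs]
    rw [Prod.mk.injEq]
    refine ⟨rfl, ?_⟩
    simp only [List.length_cons]
    push_cast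
    ring

-- A's even-branch loop: offsets run over the range, the node counter lives in the state
theorem pvA_even_loop (c : Int) (hc : 0 < c) (nodes : List String) (v pre : List String)
    (a b j : Int) (hsplit : pre ++ v = nodes) (ha : a = (pre.length : Int) * c)
    (hb : b = ((pre.length : Int) + (v.length : Int)) * c - c + 1) (hj : j = (pre.length : Int))
    (t : PySem.Dict String (List String)) :
    ((PySem.List.pyRange a b c).foldl
      (fun (st : PySem.Dict String (List String) × Int) i =>
        (st.1.insert ((PySem.List.pyGet? nodes st.2).getD "")
          (PySem.List.slice pvKeys (some i) (some (i + c))), st.2 + 1))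
      (t, j)) = (pvChain (pvCzs c v a) t, j + v.length) := by
  induction v generalizing pre a b j t with
  | nil =>
    subst hsplit ha hb hj
    rw [PySem.List.pyRange_of_pos _ _ hc]
    rw [if_neg (by simp only [List.length_nil]; push_cast; nlinarith)]
    simp [pvChain, pvCzs]
  | cons x v ih =>
    subst ha hb hj hsplit
    have hvc : 0 ≤ (v.length : Int) * c := mul_nonneg (by positivity) hc.le
    rw [pvRange_pos_cons _ _ _ hc (by simp only [List.length_cons]; push_cast; nlinarith)]
    simp only [List.foldl_cons]
    rw [PySem.List.pyGet?_append_length pre (v) x]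
    simp only [Option.getD_some]
    have := ih (pre ++ [x]) ((pre.length : Int) * c + c)
      (((pre.length : Int) + ((x :: v).length : Int)) * c - c + 1) ((pre.length : Int) + 1)
      (by simp) (by simp only [List.length_append, List.length_cons, List.length_nil]; push_cast; ring)
      (by simp only [List.length_append, List.length_cons, List.length_nil]; push_cast; ring)
      (by simp only [List.length_append, List.length_cons, List.length_nil]; push_cast; ring)
      (t.insert x (PySem.List.slice pvKeys (some ((pre.length : Int) * c))
        (some ((pre.length : Int) * c + c))))
    rw [this]
    simp only [pvChain, pvCzs]
    rw [Prod.mk.injEq]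
    refine ⟨rfl, ?_⟩
    simp only [List.length_cons]
    push_cast
    ring

-- the uneven branch of A, after splitting nodes at bound into u ++ v
theorem pvUneven (nodes u v : List String) (huv : nodes = u ++ v)
    (hulen : ((u.length : Nat) : Int) = PySem.Int.mod 16 ((nodes.length : Nat) : Int))
    (hm : ¬ PySem.Int.mod 16 ((nodes.length : Nat) : Int) = 0)
    (hnpos : (0 : Int) < ((nodes.length : Nat) : Int)) :
    (List.foldl (fun (st : PySem.Dict String (List String) × Int) i =>
        (st.1.insert ((PySem.List.pyGet? nodes i).getD "")
          (PySem.List.slice pvKeys (some st.2)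
            (some (st.2 + PySem.Int.floordiv 16 ((nodes.length : Nat) : Int)))),
          st.2 + PySem.Int.floordiv 16 ((nodes.length : Nat) : Int)))
      (List.foldl (fun (st : PySem.Dict String (List String) × Int) i =>
          (st.1.insert ((PySem.List.pyGet? nodes i).getD "")
            (PySem.List.slice pvKeys (some st.2)
              (some (st.2 + (PySem.Int.floordiv 16 ((nodes.length : Nat) : Int) + 1)))),
            st.2 + (PySem.Int.floordiv 16 ((nodes.length : Nat) : Int) + 1)))
        (PySem.Dict.empty, 0)
        (PySem.List.pyRange 0
          (16 - ((nodes.length : Nat) : Int) * PySem.Int.floordiv 16 ((nodes.length : Nat) : Int))))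
      (PySem.List.pyRange
        (16 - ((nodes.length : Nat) : Int) * PySem.Int.floordiv 16 ((nodes.length : Nat) : Int))
        ((nodes.length : Nat) : Int))).1.items
    = (pvChain (pvPlan (PySem.Int.floordiv 16 ((nodes.length : Nat) : Int))
        (PySem.Int.mod 16 ((nodes.length : Nat) : Int)) nodes 0 0) PySem.Dict.empty).items := by
  subst huv
  have hlen := List.length_append (as := u) (bs := v)
  have hmnn : 0 ≤ PySem.Int.mod 16 (((u ++ v).length : Nat) : Int) := PySem.Int.mod_nonneg 16 hnpos
  have hmlt : PySem.Int.mod 16 (((u ++ v).length : Nat) : Int) < (((u ++ v).length : Nat) : Int) :=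
    PySem.Int.mod_lt 16 hnpos
  have hbm : 16 - (((u ++ v).length : Nat) : Int) * PySem.Int.floordiv 16 (((u ++ v).length : Nat) : Int)
      = PySem.Int.mod 16 (((u ++ v).length : Nat) : Int) := by
    have h := PySem.Int.floordiv_mul_add_mod 16 (((u ++ v).length : Nat) : Int)
    linarith [mul_comm (((u ++ v).length : Nat) : Int) (PySem.Int.floordiv 16 (((u ++ v).length : Nat) : Int))]
  rw [pvA_loop (PySem.Int.floordiv 16 (((u ++ v).length : Nat) : Int) + 1) (u ++ v) u [] v 0
      (16 - (((u ++ v).length : Nat) : Int) * PySem.Int.floordiv 16 (((u ++ v).length : Nat) : Int))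
      (by simp) (by simp) (by rw [hbm]; omega) PySem.Dict.empty 0]
  rw [pvA_loop (PySem.Int.floordiv 16 (((u ++ v).length : Nat) : Int)) (u ++ v) v u []
      (16 - (((u ++ v).length : Nat) : Int) * PySem.Int.floordiv 16 (((u ++ v).length : Nat) : Int))
      (((u ++ v).length : Nat) : Int)
      (by simp) (by rw [hbm]; omega) (by rw [hbm]; omega)]
  rw [pvPlan_split _ _ u v 0 0 le_rfl (by omega), pvChain_append]

-- ===== VERDICT (by name: the statement is the Claim_ definition above) =====
theorem create_alloc_table_spec : Claim_equal_create_alloc_table := by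
  intro nodes _ hpre
  unfold Spec_create_alloc_table
  have hne : nodes ≠ [] := hpre
  have hn : 0 < nodes.length := List.length_pos_iff.mpr hne
  have hnz : (nodes.length : Int) ≠ 0 := by exact_mod_cast Nat.pos_iff_ne_zero.mp hn
  have hnpos : (0 : Int) < (nodes.length : Int) := by exact_mod_cast hn
  have hk : ((pvKeys.length : Nat) : Int) = 16 := by norm_num [pvKeys]
  have hdm : PySem.Int.divmod? (16 : Int) ((nodes.length : Nat) : Int)
      = some (PySem.Int.floordiv 16 (nodes.length : Int), PySem.Int.mod 16 (nodes.length : Int)) := by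
    simp [PySem.Int.divmod?, PySem.Int.floordiv, PySem.Int.mod, hne]
  -- B's side: buckets are the plan's value lists, dict(zip …) is the plan's chain
  have hB : create_alloc_table_alt nodes
      = (pvChain (pvPlan (PySem.Int.floordiv 16 (nodes.length : Int))
          (PySem.Int.mod 16 (nodes.length : Int)) nodes 0 0) PySem.Dict.empty).items := by
    simp only [create_alloc_table_alt, hk, hdm, Option.getD_some]
    rw [pvBucketsVals nodes.length hn]
    rw [← pvPlan_map_vals]
    rw [pvZip_chain]
  rw [hB]
  -- A's side
  simp only [create_alloc_table, hk]
  by_cases hm : PySem.Int.mod 16 ((nodes.length : Nat) : Int) = 0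
  · -- even branch: nodes.length divides 16
    rw [if_pos hm]
    have hdvd : ((nodes.length : Nat) : Int) ∣ 16 := (PySem.Int.mod_eq_zero_iff_dvd 16 _).mp hm
    have hn16 : ((nodes.length : Nat) : Int) ≤ 16 := Int.le_of_dvd (by norm_num) hdvd
    have hc : 0 < PySem.Int.floordiv 16 ((nodes.length : Nat) : Int) := by
      have := (PySem.Int.le_floordiv_iff_mul_le (a := 16) (q := 1) hnpos).mpr (by omega)
      omega
    have hmul : ((nodes.length : Nat) : Int) * PySem.Int.floordiv 16 ((nodes.length : Nat) : Int) = 16 := by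
      rw [PySem.Int.floordiv_eq_ediv_of_pos hnpos]
      exact Int.mul_ediv_cancel' hdvd
    rw [pvA_even_loop (PySem.Int.floordiv 16 ((nodes.length : Nat) : Int)) hc nodes nodes []
      0 (16 - PySem.Int.floordiv 16 ((nodes.length : Nat) : Int) + 1) 0 (by simp)
      (by simp)
      (by simp only [List.length_nil]; push_cast; linarith [hmul])
      (by simp)]
    rw [hm, pvPlan_ge _ 0 nodes 0 0 le_rfl]
  · -- uneven branch
    rw [if_neg hm]
    have hmnn : 0 ≤ PySem.Int.mod 16 ((nodes.length : Nat) : Int) := PySem.Int.mod_nonneg 16 hnpos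
    have hmlt : PySem.Int.mod 16 ((nodes.length : Nat) : Int) < ((nodes.length : Nat) : Int) :=
      PySem.Int.mod_lt 16 hnpos
    have hmle : (PySem.Int.mod 16 ((nodes.length : Nat) : Int)).toNat ≤ nodes.length := by omega
    have huv : nodes = nodes.take (PySem.Int.mod 16 ((nodes.length : Nat) : Int)).toNat
        ++ nodes.drop (PySem.Int.mod 16 ((nodes.length : Nat) : Int)).toNat :=
      (List.take_append_drop _ _).symm
    have hulen : (((nodes.take (PySem.Int.mod 16 ((nodes.length : Nat) : Int)).toNat).length : Nat) : Int)
        = PySem.Int.mod 16 ((nodes.length : Nat) : Int) := by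
      simp [List.length_take, min_eq_left hmle]
      omega
    exact pvUneven nodes _ _ huv hulen hm hnpos
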